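-- pv_equiv track=rewrite | github.com/Anna-Hax/cp-dsa | code/800-rating/Cover_In_Water.py | can_sort
-- ===== SOURCE A (Python) =====
-- def can_sort(n, arr):
--     count = 0
--     count_dot = 0
--     #return arr
--     for i in range(len(arr)):
--         if arr[i] == '.':
--             count_dot +=1
--         if arr[i] == '#' or i == (len(arr) - 1):
--             if count_dot <= 2:
--                 count += count_dot
--             else:
--                 count = 2
--                 break
--             count_dot = 0
--     return count
-- ===== SOURCE B (Python) =====
-- def can_sort(n, arr):
--     # Label each dot with the id of its segment (= number of '#' before it);
--     # the label list is nondecreasing, so a segment holds more than two dots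
--     # exactly when some label repeats at distance two in the list.
--     seg_id = []
--     h = 0
--     for ch in arr:
--         if ch == '#':
--             h += 1
--         elif ch == '.':
--             seg_id.append(h)
--     for a, c in zip(seg_id, seg_id[2:]):
--         if a == c:
--             return 2
--     return len(seg_id)
-- ===== Notes on version B (the rewrite author's own statement) =====
-- stated objective: alternative
-- what changed: B drops A's running per-segment dot counter with '#'/end-of-string boundary resets; instead it labels every dot with its segment id (the number of '#' characters before it) and detects an oversized segment purely on that monotone label list, as an equal pair at distance two (zip with the list shifted by 2), returning 2 then and the list's length otherwise.
import Mathlib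
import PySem

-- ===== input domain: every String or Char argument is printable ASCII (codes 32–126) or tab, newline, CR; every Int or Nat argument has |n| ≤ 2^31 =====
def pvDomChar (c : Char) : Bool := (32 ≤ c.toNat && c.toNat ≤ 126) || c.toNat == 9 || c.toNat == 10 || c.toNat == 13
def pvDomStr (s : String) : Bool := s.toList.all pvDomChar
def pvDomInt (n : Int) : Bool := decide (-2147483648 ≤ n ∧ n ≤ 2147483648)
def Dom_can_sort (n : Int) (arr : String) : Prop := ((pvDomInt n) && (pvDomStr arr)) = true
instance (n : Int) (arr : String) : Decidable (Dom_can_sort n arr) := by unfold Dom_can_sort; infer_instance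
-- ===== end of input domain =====

-- B replaces A's running per-segment counter (boundary resets on '#'/end) by labelling each dot with its segment id and spotting an equal pair at distance two in the label list (alternative decomposition, same O(n) cost).


-- ===== PORT A =====
-- A's for-loop with break, as structural recursion over the remaining characters;
-- `rest = []` is A's `i == len(arr) - 1` test.
def canSortLoop : List Char → Int → Int → Int
  | [], count, _cd => count
  | c :: rest, count, cd =>
    let cd' : Int := if c = '.' then cd + 1 else cd
    if c = '#' ∨ rest = [] then
      if cd' ≤ 2 then canSortLoop rest (count + cd') 0
      else 2
    else canSortLoop rest count cd'

def can_sort (n : Int) (arr : String) : Int := canSortLoop arr.toList 0 0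

-- ===== PORT B =====
-- Source B phase 1: for ch in arr: '#' → h += 1, '.' → seg_id.append(h)
def segIdsLoop : List Char → List Int → Int → List Int
  | [], ids, _h => ids
  | c :: rest, ids, h =>
    if c = '#' then segIdsLoop rest ids (h + 1)
    else if c = '.' then segIdsLoop rest (ids ++ [h]) h
    else segIdsLoop rest ids h

-- Source B phase 2: for a, c in zip(seg_id, seg_id[2:]): if a == c: return 2; return len(seg_id)
def can_sort_alt (n : Int) (arr : String) : Int :=
  let ids := segIdsLoop arr.toList [] 0
  if (ids.zip (ids.drop 2)).any (fun p => p.1 == p.2) then 2 else (ids.length : Int)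

-- ===== PRECONDITION & SPEC =====
def Spec_can_sort (n : Int) (arr : String) (out : Int) : Prop := out = can_sort_alt n arr
instance (n : Int) (arr : String) (out : Int) : Decidable (Spec_can_sort n arr out) := by unfold Spec_can_sort; infer_instance

-- ===== CLAIM (what is proved, stated in full; the proofs are below) =====
def Claim_equal_can_sort : Prop := ∀ (n : Int) (arr : String), Dom_can_sort n arr → Spec_can_sort n arr (can_sort n arr)

-- ===== LEMMAS AND PROOFS =====

-- dot weight of a character
def dChar (c : Char) : Nat := if c = '.' then 1 else 0

-- A's badness: does some '#'-delimited segment (with cd pending dots in the current one) exceed 2 dots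
theorem dChar_dot : dChar '.' = 1 := rfl
theorem dChar_of_ne (c : Char) (hd : c ≠ '.') : dChar c = 0 := by simp [dChar, hd]

def badA : List Char → Nat → Bool
  | [], _ => false
  | [c], cd => decide (2 < cd + dChar c)
  | c :: rest, cd => if c = '#' then (decide (2 < cd) || badA rest 0) else badA rest (cd + dChar c)

-- segment-id list without the accumulator
def segIds : List Char → Int → List Int
  | [], _ => []
  | c :: rest, h =>
    if c = '#' then segIds rest (h + 1)
    else if c = '.' then h :: segIds rest h
    else segIds rest h

-- recursive form of B's pair-at-distance-two scan
def hasTriple : List Int → Bool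
  | a :: b :: c :: rest => (a == c) || hasTriple (b :: c :: rest)
  | _ => false
termination_by l => l.length

theorem segIdsLoop_eq (l : List Char) : ∀ (ids : List Int) (h : Int),
    segIdsLoop l ids h = ids ++ segIds l h := by
  induction l with
  | nil => intro ids h; simp [segIdsLoop, segIds]
  | cons c rest ih =>
    intro ids h
    by_cases hc : c = '#'
    · simp [segIdsLoop, segIds, hc, ih]
    · by_cases hd : c = '.'
      · simp [segIdsLoop, segIds, hc, hd, ih]
      · simp [segIdsLoop, segIds, hc, hd, ih]

theorem zip_any_eq_hasTriple : (l : List Int) →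
    ((l.zip (l.drop 2)).any (fun p => p.1 == p.2)) = hasTriple l
  | [] => by simp [hasTriple]
  | [a] => by simp [hasTriple]
  | [a, b] => by simp [hasTriple]
  | a :: b :: c :: rest => by
      have ih := zip_any_eq_hasTriple (b :: c :: rest)
      simp only [List.drop, List.zip, List.zipWith, List.any_cons] at *
      rw [ih]
      simp [hasTriple]
termination_by l => l.length

theorem segIds_length (l : List Char) : ∀ h : Int, (segIds l h).length = l.count '.' := by
  induction l with
  | nil => intro h; simp [segIds]
  | cons c rest ih =>
    intro h
    by_cases hc : c = '#'
    · have : c ≠ '.' := by simp [hc]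
      simp [segIds, hc, this, ih, List.count_cons]
    · by_cases hd : c = '.'
      · simp [segIds, hc, hd, ih, List.count_cons]
      · simp [segIds, hc, hd, ih, List.count_cons]

theorem segIds_lb (l : List Char) : ∀ (h : Int), ∀ x ∈ segIds l h, h ≤ x := by
  induction l with
  | nil => intro h x hx; simp [segIds] at hx
  | cons c rest ih =>
    intro h x hx
    by_cases hc : c = '#'
    · simp [segIds, hc] at hx
      have := ih (h + 1) x hx; omega
    · by_cases hd : c = '.'
      · simp [segIds, hc, hd] at hx
        rcases hx with rfl | hx
        · omega
        · exact ih h x hx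
      · simp [segIds, hc, hd] at hx
        exact ih h x hx

theorem hasTriple_replicate_append (m : Nat) (h : Int) (tl : List Int)
    (htl : ∀ x ∈ tl, x ≠ h) :
    hasTriple (List.replicate m h ++ tl) = (decide (3 ≤ m) || hasTriple tl) := by
  match m with
  | 0 => simp
  | 1 =>
    match tl with
    | [] => simp [hasTriple]
    | [b] => simp [hasTriple]
    | b :: c :: r =>
      have hc : c ≠ h := htl c (by simp)
      simp [hasTriple, hc.symm]
  | 2 =>
    match tl with
    | [] => simp [hasTriple, List.replicate]
    | c :: r =>
      have hc : c ≠ h := htl c (by simp)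
      match r with
      | [] => simp [hasTriple, List.replicate, hc.symm]
      | e :: r' =>
        have he : e ≠ h := htl e (by simp)
        have hc' : (h == c) = false := beq_eq_false_iff_ne.mpr (Ne.symm hc)
        have he' : (h == e) = false := beq_eq_false_iff_ne.mpr (Ne.symm he)
        simp [hasTriple, List.replicate, hc', he']
  | (k + 3) =>
    simp [List.replicate, hasTriple]

theorem segIds_sharp (rest : List Char) (h : Int) :
    segIds ('#' :: rest) h = segIds rest (h + 1) := by simp [segIds]

theorem segIds_dot (rest : List Char) (h : Int) :
    segIds ('.' :: rest) h = h :: segIds rest h := by simp [segIds]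

theorem segIds_other (c : Char) (rest : List Char) (h : Int) (hc : c ≠ '#') (hd : c ≠ '.') :
    segIds (c :: rest) h = segIds rest h := by simp [segIds, hc, hd]

theorem badA_cons (c b : Char) (t : List Char) (cd : Nat) :
    badA (c :: b :: t) cd
      = if c = '#' then (decide (2 < cd) || badA (b :: t) 0) else badA (b :: t) (cd + dChar c) := rfl

theorem badA_eq_hasTriple (l : List Char) : ∀ (cd : Nat) (h : Int), l ≠ [] →
    badA l cd = hasTriple (List.replicate cd h ++ segIds l h) := by
  induction l with
  | nil => intro _ _ hne; exact absurd rfl hne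
  | cons c rest ih =>
    intro cd h _
    have hrep : ∀ m : Nat, hasTriple (List.replicate m h) = decide (3 ≤ m) := fun m => by
      simpa [hasTriple] using hasTriple_replicate_append m h [] (by simp)
    by_cases hr : rest = []
    · subst hr
      by_cases hd : c = '.'
      · subst hd
        rw [segIds_dot, show segIds ([] : List Char) h = [] from rfl,
          show List.replicate cd h ++ [h] = List.replicate (cd + 1) h by
            simp [List.replicate_succ'],
          hrep]
        show decide (2 < cd + dChar '.') = _
        rw [dChar_dot]
        exact decide_eq_decide.mpr (by omega)
      · have hseg : segIds [c] h = [] := by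
          by_cases hc : c = '#'
          · subst hc; rw [segIds_sharp]; rfl
          · rw [segIds_other c [] h hc hd]; rfl
        rw [hseg, List.append_nil, hrep]
        show decide (2 < cd + dChar c) = _
        rw [dChar_of_ne c hd]
        exact decide_eq_decide.mpr (by omega)
    · obtain ⟨b, t, rfl⟩ := List.exists_cons_of_ne_nil hr
      by_cases hc : c = '#'
      · subst hc
        rw [badA_cons, if_pos rfl, segIds_sharp,
          hasTriple_replicate_append cd h (segIds (b :: t) (h + 1))
            (fun x hx => by have := segIds_lb (b :: t) (h + 1) x hx; omega),
          ih 0 (h + 1) (by simp)]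
        simp only [List.replicate_zero, List.nil_append]
        congr 1
      · by_cases hd : c = '.'
        · subst hd
          rw [badA_cons, if_neg (by decide), dChar_dot, segIds_dot,
            show List.replicate cd h ++ h :: segIds (b :: t) h
                = List.replicate (cd + 1) h ++ segIds (b :: t) h by
              simp [List.replicate_succ'],
            ih (cd + 1) h hr]
        · rw [badA_cons, if_neg hc, dChar_of_ne c hd, segIds_other c (b :: t) h hc hd,
            Nat.add_zero, ih cd h hr]

theorem canSortLoop_char (l : List Char) : ∀ (count : Int) (m : Nat), (l = [] → m = 0) →
    canSortLoop l count (m : Int)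
      = if badA l m then 2 else count + (m : Int) + ((l.count '.' : Nat) : Int) := by
  induction l with
  | nil =>
    intro count m hm
    simp [canSortLoop, badA, hm rfl]
  | cons c rest ih =>
    intro count m _
    by_cases hr : rest = []
    · subst hr
      by_cases hd : c = '.'
      · simp only [canSortLoop, badA, hd, if_pos, or_true, ite_true, reduceIte, dChar,
          List.count_cons, List.count_nil]
        split_ifs with h1 h2 h2 <;> simp_all [canSortLoop, hd] <;> omega
      · simp only [canSortLoop, badA, hd, or_true, if_pos, ite_false, reduceIte, dChar,
          List.count_cons, List.count_nil]
        split_ifs with h1 h2 h2 <;> simp_all [canSortLoop, hd] <;> omega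
    · by_cases hc : c = '#'
      · have hdd : c ≠ '.' := by simp [hc]
        have e1 : canSortLoop (c :: rest) count (m : Int)
            = if (m : Int) ≤ 2 then canSortLoop rest (count + m) 0 else 2 := by
          simp [canSortLoop, hc, hdd]
        rw [e1, show (0 : Int) = ((0 : Nat) : Int) by simp,
          ih (count + m) 0 (fun h => absurd h hr)]
        have e2 : badA (c :: rest) m = (decide (2 < m) || badA rest 0) := by
          obtain ⟨b, t, rfl⟩ := List.exists_cons_of_ne_nil hr
          simp [badA, hc]
        rw [e2]
        have : (c :: rest).count '.' = rest.count '.' := by simp [List.count_cons, hdd]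
        rw [this]
        by_cases h2 : (2:Int) < m
        · have hm : 2 < m := by exact_mod_cast h2
          rw [if_neg (by omega), if_pos (by simp [hm])]
        · rw [if_pos (by omega)]
          by_cases hb : badA rest 0 = true
          · simp [hb]
          · have hb' : badA rest 0 = false := eq_false_of_ne_true hb
            have hm : ¬ 2 < m := by omega
            rw [if_neg (by simp [hb']), if_neg (by simp [hb', hm])]
            push_cast; ring
      · have e1 : canSortLoop (c :: rest) count (m : Int)
            = canSortLoop rest count ((m + dChar c : Nat) : Int) := by
          by_cases hd : c = '.' <;> simp [canSortLoop, hc, hr, hd, dChar] <;> push_cast <;> ring_nf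
        rw [e1, ih count (m + dChar c) (fun h => absurd h hr)]
        have e2 : badA (c :: rest) m = badA rest (m + dChar c) := by
          obtain ⟨b, t, rfl⟩ := List.exists_cons_of_ne_nil hr
          simp [badA, hc]
        rw [e2]
        have : (c :: rest).count '.' = dChar c + rest.count '.' := by
          by_cases hd : c = '.' <;> simp [List.count_cons, hd, dChar] <;> omega
        rw [this]
        split_ifs <;> push_cast <;> ring

-- ===== VERDICT (by name: the statement is the Claim_ definition above) =====
theorem can_sort_spec : Claim_equal_can_sort := by
  intro n arr _
  show can_sort n arr = can_sort_alt n arr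
  unfold can_sort can_sort_alt
  simp only [segIdsLoop_eq, List.nil_append, zip_any_eq_hasTriple]
  by_cases h0 : arr.toList = []
  · simp [h0, canSortLoop, segIds, hasTriple]
  · rw [show canSortLoop arr.toList 0 0 = canSortLoop arr.toList 0 ((0 : Nat) : Int) by norm_num,
      canSortLoop_char arr.toList 0 0 (fun h => absurd h h0),
      badA_eq_hasTriple arr.toList 0 0 h0]
    simp [segIds_length]
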